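-- pv_equiv track=rewrite | github.com/namgi2386/study_note | 0905/l_동철gpt.py | min_time_assignment
-- ===== SOURCE A (Python) =====
-- def min_time_assignment(Time):
--     N = len(Time)
--     dp = [1] * (1 << N)
--     dp[0] = 0
--
--     for mask in range(1 << N):
--         i = bin(mask).count('1')
--         for j in range(N):
--             if not (mask & (1 << j)):
--                 dp[mask | (1 << j)] = max(dp[mask | (1 << j)], dp[mask] * Time[i][j])
--
--     return dp[(1 << N) - 1]  # 모든 작업이 할당된 상태에서의 최소 시간
-- ===== SOURCE B (Python) =====
-- def min_time_assignment(Time):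
--     N = len(Time)
--     memo = {0: 0}
--
--     def f(mask):
--         if mask in memo:
--             return memo[mask]
--         p = bin(mask).count('1')
--         best = 1
--         for j in range(N):
--             if mask & (1 << j):
--                 best = max(best, f(mask ^ (1 << j)) * Time[p - 1][j])
--         memo[mask] = best
--         return best
--
--     return f((1 << N) - 1)
-- ===== Notes on version B (the rewrite author's own statement) =====
-- stated objective: alternative
-- what changed: Replaced A's forward bottom-up DP table that pushes max-updates from each mask to its one-bit supersets by a top-down memoized recursion f(mask) that pulls from the submasks obtained by removing one set bit, with f(0)=0 and a floor of 1 at every level.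
import Mathlib
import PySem

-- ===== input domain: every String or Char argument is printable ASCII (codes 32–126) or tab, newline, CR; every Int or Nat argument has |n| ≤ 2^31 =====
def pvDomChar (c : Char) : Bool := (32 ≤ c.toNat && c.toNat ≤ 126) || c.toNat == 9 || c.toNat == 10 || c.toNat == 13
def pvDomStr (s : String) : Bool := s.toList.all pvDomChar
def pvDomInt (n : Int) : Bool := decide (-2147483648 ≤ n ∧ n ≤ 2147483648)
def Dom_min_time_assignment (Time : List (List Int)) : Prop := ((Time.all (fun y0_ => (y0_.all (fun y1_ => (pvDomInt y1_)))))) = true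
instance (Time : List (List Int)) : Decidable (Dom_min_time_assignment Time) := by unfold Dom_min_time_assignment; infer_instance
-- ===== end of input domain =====

-- B replaces A's forward bottom-up bitmask-DP table (push updates to supersets) by a top-down
-- memoized recursion f(mask) that pulls from the submasks obtained by removing one set bit
-- (objective: alternative decomposition, same asymptotic cost).

-- ===== PORT A =====

-- bin(mask).count('1') : number of 1 bits of a nonnegative Python int
def pyBitCount : Nat → Nat
  | 0 => 0
  | n + 1 => pyBitCount ((n + 1) / 2) + (n + 1) % 2
decreasing_by omega

-- the inner `for j in range(N)` loop of A, processing one mask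
-- (Time[i][j] is read with getD 0: exact under Pre_, where all accessed indices are in range;
--  outside Pre_ the Python raises IndexError)
def aInner (Time : List (List Int)) (mask : Nat) (dp : List Int) : List Int :=
  (List.range Time.length).foldl (fun dp j =>
    if mask &&& (1 <<< j) = 0 then
      dp.set (mask ||| (1 <<< j))
        (max (dp.getD (mask ||| (1 <<< j)) 0)
             (dp.getD mask 0 * ((Time.getD (pyBitCount mask) []).getD j 0)))
    else dp) dp

def min_time_assignment (Time : List (List Int)) : Int :=
  let N := Time.length
  let dp0 := (List.replicate (2 ^ N) (1 : Int)).set 0 0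
  let dp := (List.range (2 ^ N)).foldl (fun dp mask => aInner Time mask dp) dp0
  dp.getD (2 ^ N - 1) 0

-- ===== PORT B =====

-- termination helper for the top-down recursion: removing a set bit strictly decreases the mask
theorem pvXorPowLt {m j : Nat} (h : m.testBit j = true) : m ^^^ (1 <<< j) < m := by
  rw [Nat.one_shiftLeft]
  apply Nat.lt_of_testBit j
  · simp [Nat.testBit_xor, h]
  · exact h
  · intro i hi
    simp [Nat.testBit_xor, Nat.ne_of_lt hi]

mutual
  -- f(mask) of Source B (memoisation is an evaluation detail; the value is the same)
  def altF (Time : List (List Int)) (mask : Nat) : Int :=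
    if mask = 0 then 0
    else altLoop Time mask (List.range Time.length) 1
  termination_by (mask, Time.length + 1)

  -- the `for j in range(N)` accumulation of `best` in f
  def altLoop (Time : List (List Int)) (mask : Nat) : List Nat → Int → Int
    | [], best => best
    | j :: js, best =>
      if h : mask.testBit j then
        altLoop Time mask js
          (max best (altF Time (mask ^^^ (1 <<< j)) *
            ((Time.getD (pyBitCount mask - 1) []).getD j 0)))
      else altLoop Time mask js best
  termination_by js _ => (mask, js.length)
  decreasing_by
  all_goals first
    | exact Prod.Lex.left _ _ (pvXorPowLt h)
    | (apply Prod.Lex.right; simp)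
end

def min_time_assignment_alt (Time : List (List Int)) : Int :=
  altF Time (2 ^ Time.length - 1)

-- ===== PRECONDITION & SPEC =====

-- Pre_ excludes exactly the inputs on which A raises IndexError: A reads Time[i][j] for all
-- i, j < len(Time), so every row must have at least len(Time) entries.
def Pre_min_time_assignment (Time : List (List Int)) : Prop :=
  ∀ r ∈ Time, Time.length ≤ r.length

instance (Time : List (List Int)) : Decidable (Pre_min_time_assignment Time) := by
  unfold Pre_min_time_assignment; infer_instance

def pvWitness_min_time_assignment : List (List Int) := [[2, 3], [4, 5]]

def Spec_min_time_assignment (Time : List (List Int)) (out : Int) : Prop :=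
  out = min_time_assignment_alt Time

instance (Time : List (List Int)) (out : Int) : Decidable (Spec_min_time_assignment Time out) := by
  unfold Spec_min_time_assignment; infer_instance

-- ===== CLAIM (what is proved, stated in full; the proofs are below) =====
def Claim_equal_min_time_assignment : Prop :=
  ∀ (Time : List (List Int)), Dom_min_time_assignment Time →
    Pre_min_time_assignment Time →
    Spec_min_time_assignment Time (min_time_assignment Time)

-- ===== LEMMAS AND PROOFS =====

-- max-accumulating fold over a list of indices: take max with w j whenever c j holds
def mfold (w : Nat → Int) (c : Nat → Bool) (a : Int) (js : List Nat) : Int :=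
  js.foldl (fun v j => if c j then max v (w j) else v) a

theorem mfold_cons (w : Nat → Int) (c : Nat → Bool) (a : Int) (j : Nat) (js : List Nat) :
    mfold w c a (j :: js) = mfold w c (if c j then max a (w j) else a) js := rfl

theorem mfold_max (w : Nat → Int) (c : Nat → Bool) (a x : Int) (js : List Nat) :
    mfold w c (max a x) js = max (mfold w c a js) x := by
  induction js generalizing a with
  | nil => rfl
  | cons j js ih =>
    by_cases h : c j
    · rw [mfold_cons, if_pos h, max_right_comm, ih, mfold_cons, if_pos h]
    · rw [mfold_cons, if_neg h, ih, mfold_cons, if_neg h]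

theorem le_mfold (w : Nat → Int) (c : Nat → Bool) (a : Int) (js : List Nat) :
    a ≤ mfold w c a js := by
  induction js generalizing a with
  | nil => exact le_refl a
  | cons j js ih =>
    by_cases h : c j
    · rw [mfold_cons, if_pos h]
      exact le_trans (le_max_left a (w j)) (ih (max a (w j)))
    · rw [mfold_cons, if_neg h]; exact ih a

theorem mfold_congr (w w' : Nat → Int) (c c' : Nat → Bool) (a : Int) (js : List Nat)
    (h : ∀ j ∈ js, c j = c' j ∧ (c j = true → w j = w' j)) :
    mfold w c a js = mfold w' c' a js := by
  unfold mfold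
  refine List.foldl_ext _ _ a (fun v j hj => ?_)
  obtain ⟨hc, hw⟩ := h j hj
  by_cases hcj : c j = true
  · rw [if_pos hcj, if_pos (hc ▸ hcj), hw hcj]
  · rw [if_neg hcj, if_neg (hc ▸ hcj)]

theorem mfold_false (w : Nat → Int) (c : Nat → Bool) (a : Int) (js : List Nat)
    (h : ∀ j ∈ js, c j = false) : mfold w c a js = a := by
  induction js with
  | nil => rfl
  | cons j js ih =>
    rw [mfold_cons, if_neg (by simp [h j (by simp)])]
    exact ih (fun j' hj' => h j' (List.mem_cons_of_mem _ hj'))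

theorem mfold_split (w : Nat → Int) (c q : Nat → Bool) (a : Int) (js : List Nat) :
    mfold w (fun j => c j || q j) a js = mfold w q (mfold w c a js) js := by
  induction js generalizing a with
  | nil => rfl
  | cons j js ih =>
    rw [mfold_cons, mfold_cons, mfold_cons]
    by_cases hq : q j = true
    · by_cases hc : c j = true
      · rw [if_pos (show (c j || q j) = true by simp [hq, hc]), if_pos hc, if_pos hq]
        conv_rhs => rw [mfold_max]
        rw [← ih]
        exact (max_eq_left (le_trans (le_max_right a (w j))
          (le_mfold w (fun j => c j || q j) (max a (w j)) js))).symm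
      · rw [if_pos (show (c j || q j) = true by simp [hq]), if_neg hc, if_pos hq]
        conv_rhs => rw [mfold_max]
        rw [← ih, mfold_max]
    · by_cases hc : c j = true
      · rw [if_pos (by simp [hc]), if_pos hc, if_neg hq, ih]
      · rw [if_neg (by simp [hc, hq]), if_neg hc, if_neg hq, ih]

-- bit facts
theorem pvOrXor {k j : Nat} (h : k.testBit j = false) : (k ||| (1 <<< j)) ^^^ (1 <<< j) = k := by
  rw [Nat.one_shiftLeft]
  apply Nat.eq_of_testBit_eq
  intro i
  by_cases hji : j = i
  · subst hji; simp [Nat.testBit_xor, Nat.testBit_or, h]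
  · simp [Nat.testBit_xor, Nat.testBit_or, hji]

theorem pvOrBit {k j : Nat} (_h : k.testBit j = false) : (k ||| (1 <<< j)).testBit j = true := by
  simp [Nat.one_shiftLeft, Nat.testBit_or]

theorem pvXorOr {m j : Nat} (h : m.testBit j = true) : (m ^^^ (1 <<< j)) ||| (1 <<< j) = m := by
  rw [Nat.one_shiftLeft]
  apply Nat.eq_of_testBit_eq
  intro i
  by_cases hji : j = i
  · subst hji; simp [Nat.testBit_xor, Nat.testBit_or, h]
  · simp [Nat.testBit_xor, Nat.testBit_or, hji]

theorem pvXorBit {m j : Nat} (h : m.testBit j = true) : (m ^^^ (1 <<< j)).testBit j = false := by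
  simp [Nat.one_shiftLeft, Nat.testBit_xor, h]

theorem pvAndZero (k j : Nat) : (k &&& (1 <<< j) = 0) ↔ k.testBit j = false := by
  rw [Nat.one_shiftLeft, Nat.and_two_pow]
  cases h : k.testBit j
  · simp
  · have h2 := Nat.two_pow_pos j
    simp only [Bool.toNat_true, one_mul]
    exact iff_of_false (by omega) (by simp)

-- popcount: characterisation by testBit over an interval, and the one-extra-bit law
theorem pyBitCount_unfold (n : Nat) : pyBitCount n = pyBitCount (n / 2) + n % 2 := by
  match n with
  | 0 => rfl
  | n + 1 => simp only [pyBitCount]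

theorem pyBitCount_eq_filter (B : Nat) : ∀ n, n < 2 ^ B →
    pyBitCount n = ((List.range B).filter (fun i => n.testBit i)).length := by
  induction B with
  | zero =>
    intro n hn
    have hn0 : n = 0 := by omega
    subst hn0; simp [pyBitCount]
  | succ B ih =>
    intro n hn
    have hdiv : n / 2 < 2 ^ B := by
      have h2 : (2 : Nat) ^ (B + 1) = 2 * 2 ^ B := by ring
      omega
    have htail : (List.filter (fun i => n.testBit i) (List.map Nat.succ (List.range B))).length
        = ((List.range B).filter (fun i => (n / 2).testBit i)).length := by
      rw [List.filter_map, List.length_map]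
      congr 1
      apply List.filter_congr
      intro i _
      show n.testBit i.succ = (n / 2).testBit i
      exact Nat.testBit_succ n i
    rw [pyBitCount_unfold, List.range_succ_eq_map]
    by_cases h0 : n % 2 = 1
    · rw [List.filter_cons, if_pos (by simp [Nat.testBit_zero, h0]), List.length_cons, htail,
        ← ih (n / 2) hdiv]
      omega
    · rw [List.filter_cons, if_neg (by simp [Nat.testBit_zero, h0]), htail, ← ih (n / 2) hdiv]
      omega

theorem filter_extra (k j : Nat) (hk : k.testBit j = false) :
    ∀ l : List Nat, l.Nodup → j ∈ l →
      (l.filter (fun i => k.testBit i || decide (j = i))).length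
        = (l.filter (fun i => k.testBit i)).length + 1 := by
  intro l
  induction l with
  | nil => intro _ h; cases h
  | cons a l ih =>
    intro hnd hmem
    rcases List.nodup_cons.mp hnd with ⟨ha, hl⟩
    by_cases hja : j = a
    · subst hja
      rw [List.filter_cons, List.filter_cons, if_pos (by simp), if_neg (by simp [hk]),
        List.length_cons]
      have hfc : (l.filter (fun i => k.testBit i || decide (j = i)))
          = l.filter (fun i => k.testBit i) :=
        List.filter_congr (fun i hi => by simp [show ¬ j = i from fun he => ha (he ▸ hi)])
      rw [hfc]
    · have hjl : j ∈ l := by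
        rcases List.mem_cons.mp hmem with h | h
        · exact absurd h hja
        · exact h
      rw [List.filter_cons, List.filter_cons,
        show (k.testBit a || decide (j = a)) = k.testBit a by simp [hja]]
      by_cases hca : k.testBit a = true
      · rw [if_pos hca, if_pos hca, List.length_cons, List.length_cons, ih hl hjl]
      · rw [if_neg hca, if_neg hca, ih hl hjl]

theorem pyBitCount_or {k j : Nat} (h : k.testBit j = false) :
    pyBitCount (k ||| (1 <<< j)) = pyBitCount k + 1 := by
  have hkB : k < 2 ^ (k + j + 1) :=
    lt_of_lt_of_le Nat.lt_two_pow_self (Nat.pow_le_pow_right (by norm_num) (by omega))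
  have hjB : (1 <<< j) < 2 ^ (k + j + 1) := by
    rw [Nat.one_shiftLeft]
    exact Nat.pow_lt_pow_right (by norm_num) (by omega)
  have horB : k ||| (1 <<< j) < 2 ^ (k + j + 1) := Nat.or_lt_two_pow hkB hjB
  rw [pyBitCount_eq_filter _ _ horB, pyBitCount_eq_filter _ _ hkB]
  rw [show (List.range (k + j + 1)).filter (fun i => (k ||| (1 <<< j)).testBit i)
      = (List.range (k + j + 1)).filter (fun i => k.testBit i || decide (j = i)) from
    List.filter_congr (fun i _ => by
      simp [Nat.one_shiftLeft, Nat.testBit_or, Nat.testBit_two_pow])]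
  exact filter_extra k j h _ (List.nodup_range) (List.mem_range.mpr (by omega))

-- condition split: a predecessor m ^^^ 2^j is < k+1 iff it is < k or it is exactly mask k
theorem pvCondSplit (m k j : Nat) :
    (m.testBit j && decide (m ^^^ (1 <<< j) < k + 1)) =
      ((m.testBit j && decide (m ^^^ (1 <<< j) < k)) ||
       (decide (k &&& (1 <<< j) = 0) && decide (m = k ||| (1 <<< j)))) := by
  by_cases hm : m.testBit j = true
  · by_cases heq : m ^^^ (1 <<< j) = k
    · have hkb : k.testBit j = false := heq ▸ pvXorBit hm
      have hor : k ||| (1 <<< j) = m := by rw [← heq, pvXorOr hm]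
      have hand : k &&& (1 <<< j) = 0 := (pvAndZero k j).mpr hkb
      simp [hand, hor.symm, pvOrXor hkb]
    · have hqf : (decide (k &&& (1 <<< j) = 0) && decide (m = k ||| (1 <<< j))) = false := by
        by_cases ha : k &&& (1 <<< j) = 0
        · by_cases hb : m = k ||| (1 <<< j)
          · exact absurd (by rw [hb, pvOrXor ((pvAndZero k j).mp ha)]) heq
          · simp [hb]
        · simp [ha]
      rw [hqf, Bool.or_false, hm, Bool.true_and, Bool.true_and]
      have hxk : m ^^^ (1 <<< j) ≠ k := heq
      exact decide_eq_decide.mpr (by omega)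
  · have hm' : m.testBit j = false := by simp at hm; exact hm
    have hqf : (decide (k &&& (1 <<< j) = 0) && decide (m = k ||| (1 <<< j))) = false := by
      by_cases ha : k &&& (1 <<< j) = 0
      · by_cases hb : m = k ||| (1 <<< j)
        · have ht : m.testBit j = true := by rw [hb]; exact pvOrBit ((pvAndZero k j).mp ha)
          rw [hm'] at ht
          simp at ht
        · simp [hb]
      · simp [ha]
    rw [hqf, Bool.or_false, hm', Bool.false_and, Bool.false_and]

-- weight of predecessor (m with bit j removed) in the pull formulation
def wgt (Time : List (List Int)) (m : Nat) (j : Nat) : Int :=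
  altF Time (m ^^^ (1 <<< j)) * ((Time.getD (pyBitCount m - 1) []).getD j 0)

-- dp[m] after the first k outer iterations of A, in pull form: contributions of all
-- predecessors already processed (those < k)
def dvalC (Time : List (List Int)) (k m : Nat) : Int :=
  mfold (wgt Time m) (fun j => m.testBit j && decide (m ^^^ (1 <<< j) < k))
    (if m = 0 then 0 else 1) (List.range Time.length)

theorem altLoop_eq_mfold (Time : List (List Int)) (mask : Nat) (js : List Nat) (best : Int) :
    altLoop Time mask js best = mfold (wgt Time mask) (fun j => mask.testBit j) best js := by
  induction js generalizing best with
  | nil => simp only [altLoop]; rfl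

  | cons j js ih =>
    by_cases h : mask.testBit j = true
    · simp only [altLoop]
      rw [dif_pos h, ih, mfold_cons, if_pos h]
      rfl
    · simp only [altLoop]
      rw [dif_neg h, ih, mfold_cons, if_neg h]

theorem dvalC_self (Time : List (List Int)) (k m : Nat) (h : m ≤ k) :
    dvalC Time k m = altF Time m := by
  by_cases hm : m = 0
  · subst hm
    unfold dvalC
    rw [mfold_false _ _ _ _ (fun j _ => by simp [Nat.zero_testBit]), if_pos rfl]
    simp [altF]
  · unfold dvalC
    rw [if_neg hm, show altF Time m = altLoop Time m (List.range Time.length) 1 by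
      simp only [altF]; rw [if_neg hm]]
    rw [altLoop_eq_mfold]
    apply mfold_congr
    intro j _
    refine ⟨?_, fun _ => rfl⟩
    by_cases hb : m.testBit j = true
    · simp [hb, Nat.lt_of_lt_of_le (pvXorPowLt hb) h]
    · rw [Bool.not_eq_true] at hb
      simp [hb]

theorem getD_set (l : List Int) (n m : Nat) (v : Int) :
    (l.set n v).getD m 0 = if n = m ∧ n < l.length then v else l.getD m 0 := by
  rw [List.getD_eq_getElem?_getD, List.getD_eq_getElem?_getD, List.getElem?_set]
  by_cases h1 : n = m
  · subst h1
    by_cases h2 : n < l.length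
    · simp [h2]
    · simp [h2]
  · simp [h1]

theorem aInner_go_length (Time : List (List Int)) (mask : Nat) :
    ∀ (js : List Nat) (dp : List Int),
      (js.foldl (fun dp j =>
        if mask &&& (1 <<< j) = 0 then
          dp.set (mask ||| (1 <<< j))
            (max (dp.getD (mask ||| (1 <<< j)) 0)
                 (dp.getD mask 0 * ((Time.getD (pyBitCount mask) []).getD j 0)))
        else dp) dp).length = dp.length := by
  intro js
  induction js with
  | nil => intro dp; rfl
  | cons j js ih =>
    intro dp
    rw [List.foldl_cons, ih]
    by_cases h : mask &&& (1 <<< j) = 0 <;> simp [h]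

theorem aInner_length (Time : List (List Int)) (mask : Nat) (dp : List Int) :
    (aInner Time mask dp).length = dp.length := by
  unfold aInner
  exact aInner_go_length Time mask (List.range Time.length) dp

theorem aInner_go_pointwise (Time : List (List Int)) (k : Nat) :
    ∀ (js : List Nat) (dp : List Int) (m : Nat), k < dp.length →
      (∀ j ∈ js, k ||| (1 <<< j) < dp.length) →
      ((js.foldl (fun dp j =>
        if k &&& (1 <<< j) = 0 then
          dp.set (k ||| (1 <<< j))
            (max (dp.getD (k ||| (1 <<< j)) 0)
                 (dp.getD k 0 * ((Time.getD (pyBitCount k) []).getD j 0)))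
        else dp) dp).getD m 0)
      = mfold (fun j => dp.getD k 0 * ((Time.getD (pyBitCount k) []).getD j 0))
          (fun j => decide (k &&& (1 <<< j) = 0) && decide (m = k ||| (1 <<< j)))
          (dp.getD m 0) js := by
  intro js
  induction js with
  | nil => intro dp m _ _; rfl
  | cons j js ih =>
    intro dp m hk hb
    rw [List.foldl_cons, mfold_cons]
    by_cases hfree : k &&& (1 <<< j) = 0
    · rw [if_pos hfree]
      have htlen : k ||| (1 <<< j) < dp.length := hb j (by simp)
      have hkb : k.testBit j = false := (pvAndZero k j).mp hfree
      have hkt : k ≠ k ||| (1 <<< j) := by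
        intro he
        have h1 := pvOrBit hkb
        rw [← he, hkb] at h1
        simp at h1
      have hset_k : (dp.set (k ||| (1 <<< j))
          (max (dp.getD (k ||| (1 <<< j)) 0)
               (dp.getD k 0 * ((Time.getD (pyBitCount k) []).getD j 0)))).getD k 0
          = dp.getD k 0 := by
        rw [getD_set, if_neg]
        rintro ⟨he, _⟩
        exact hkt he.symm
      rw [ih _ m (by rw [List.length_set]; exact hk)
        (fun j' hj' => by rw [List.length_set]; exact hb j' (List.mem_cons_of_mem _ hj'))]
      rw [mfold_congr _
        (fun j' => dp.getD k 0 * ((Time.getD (pyBitCount k) []).getD j' 0)) _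
        (fun j' => decide (k &&& (1 <<< j') = 0) && decide (m = k ||| (1 <<< j'))) _ js
        (fun j' _ => ⟨rfl, fun _ => by rw [hset_k]⟩)]
      congr 1
      rw [getD_set]
      by_cases hmt : m = k ||| (1 <<< j)
      · rw [if_pos ⟨hmt.symm, htlen⟩, if_pos (by simp [hfree, hmt]), hmt]
      · rw [if_neg (fun hc => hmt hc.1.symm), if_neg (by simp [hmt])]
    · rw [if_neg hfree]
      rw [ih dp m hk (fun j' hj' => hb j' (List.mem_cons_of_mem _ hj'))]
      congr 1
      rw [if_neg (by simp [hfree])]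

theorem aInner_pointwise (Time : List (List Int)) (k : Nat) (dp : List Int) (m : Nat)
    (hk : k < dp.length) (hb : ∀ j < Time.length, k ||| (1 <<< j) < dp.length) :
    (aInner Time k dp).getD m 0 =
      mfold (fun j => dp.getD k 0 * ((Time.getD (pyBitCount k) []).getD j 0))
        (fun j => decide (k &&& (1 <<< j) = 0) && decide (m = k ||| (1 <<< j)))
        (dp.getD m 0) (List.range Time.length) := by
  unfold aInner
  exact aInner_go_pointwise Time k (List.range Time.length) dp m hk
    (fun j hj => hb j (List.mem_range.mp hj))

theorem outer_length (Time : List (List Int)) :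
    ∀ (ms : List Nat) (dp : List Int),
      (ms.foldl (fun dp mask => aInner Time mask dp) dp).length = dp.length := by
  intro ms
  induction ms with
  | nil => intro dp; rfl
  | cons a ms ih => intro dp; rw [List.foldl_cons, ih, aInner_length]

theorem outer_inv (Time : List (List Int)) (k : Nat) (hk : k ≤ 2 ^ Time.length) :
    ∀ m < 2 ^ Time.length,
      ((List.range k).foldl (fun dp mask => aInner Time mask dp)
        ((List.replicate (2 ^ Time.length) (1 : Int)).set 0 0)).getD m 0 = dvalC Time k m := by
  induction k with
  | zero =>
    intro m hm
    rw [List.range_zero, List.foldl_nil, getD_set]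
    unfold dvalC
    rw [mfold_false _ _ _ _ (fun j _ => by simp)]
    by_cases hm0 : m = 0
    · subst hm0
      rw [if_pos ⟨rfl, by simp [Nat.two_pow_pos]⟩, if_pos rfl]
    · rw [if_neg (fun hc => hm0 hc.1.symm), if_neg hm0, List.getD_replicate _ hm]
  | succ k ih =>
    intro m hm
    have hklt : k < 2 ^ Time.length := by omega
    rw [List.range_succ, List.foldl_append, List.foldl_cons, List.foldl_nil]
    have hplen : ((List.range k).foldl (fun dp mask => aInner Time mask dp)
        ((List.replicate (2 ^ Time.length) (1 : Int)).set 0 0)).length = 2 ^ Time.length := by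
      rw [outer_length, List.length_set, List.length_replicate]
    rw [aInner_pointwise Time k _ m (by rw [hplen]; omega)
      (fun j hj => by
        rw [hplen]
        exact Nat.or_lt_two_pow hklt
          (by rw [Nat.one_shiftLeft]; exact Nat.pow_lt_pow_right (by norm_num) hj))]
    rw [show ((List.range k).foldl (fun dp mask => aInner Time mask dp)
        ((List.replicate (2 ^ Time.length) (1 : Int)).set 0 0)).getD k 0 = altF Time k by
      rw [ih (by omega) k hklt, dvalC_self Time k k (le_refl k)]]
    rw [ih (by omega) m hm]
    rw [mfold_congr _ (wgt Time m) _
      (fun j => decide (k &&& (1 <<< j) = 0) && decide (m = k ||| (1 <<< j))) _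
      (List.range Time.length)
      (fun j _ => ⟨rfl, fun hq => by
        rw [Bool.and_eq_true] at hq
        have h1 : k &&& (1 <<< j) = 0 := of_decide_eq_true hq.1
        have hkb : k.testBit j = false := (pvAndZero k j).mp h1
        have hmk : m = k ||| (1 <<< j) := of_decide_eq_true hq.2
        unfold wgt
        rw [hmk, pvOrXor hkb, pyBitCount_or hkb, Nat.add_sub_cancel]⟩)]
    unfold dvalC
    rw [show (fun j => m.testBit j && decide (m ^^^ (1 <<< j) < k + 1))
        = (fun j => (m.testBit j && decide (m ^^^ (1 <<< j) < k))
            || (decide (k &&& (1 <<< j) = 0) && decide (m = k ||| (1 <<< j)))) from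
      funext (fun j => pvCondSplit m k j)]
    rw [mfold_split]

-- ===== VERDICT (by name: the statement is the Claim_ definition above) =====
theorem min_time_assignment_spec : Claim_equal_min_time_assignment := by
  intro Time _ _
  unfold Spec_min_time_assignment min_time_assignment min_time_assignment_alt
  have hpos : 0 < 2 ^ Time.length := Nat.two_pow_pos Time.length
  rw [outer_inv Time (2 ^ Time.length) (le_refl _) (2 ^ Time.length - 1) (by omega),
    dvalC_self Time (2 ^ Time.length) (2 ^ Time.length - 1) (by omega)]
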